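-- pv_equiv track=rewrite | github.com/SChandrasekhar96/AI-Resume-Extractor | extract3.py | extract_experience_section
-- ===== SOURCE A (Python) =====
-- def extract_experience_section(text):
--     lines = text.split('\n')
--     experience_section = []
--     capture = False
--     experience_keywords = ['experience', 'work history', 'internship', 'employment']
--     stop_keywords = ['education', 'certifications', 'projects', 'skills', 'languages', 'contact']
--
--     for line in lines:
--         lower_line = line.lower().strip()
--         if not capture and any(k in lower_line for k in experience_keywords) and len(lower_line) <= 60:
--             capture = True
--             continue
--         if capture:
--             if any(stop in lower_line for stop in stop_keywords) and len(lower_line) <= 60: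
--                 break
--             experience_section.append(line.strip())
--     return "\n".join(experience_section).strip() if experience_section else "Experience section not found"
-- ===== SOURCE B (Python) =====
-- def extract_experience_section(text):
--     lines = text.split('\n')
--     experience_keywords = ['experience', 'work history', 'internship', 'employment']
--     stop_keywords = ['education', 'certifications', 'projects', 'skills', 'languages', 'contact']
--
--     def hits(keywords, line):
--         t = line.lower().strip()
--         return any(k in t for k in keywords) and len(t) <= 60
--
--     i = next((idx for idx, l in enumerate(lines) if hits(experience_keywords, l)), None)
--     if i is None:
--         return "Experience section not found"
--     rest = lines[i + 1:]
--     j = next((idx for idx, l in enumerate(rest) if hits(stop_keywords, l)), None)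
--     block = [l.strip() for l in (rest if j is None else rest[:j])]
--     return "\n".join(block).strip() if block else "Experience section not found"
-- ===== Notes on version B (the rewrite author's own statement) =====
-- stated objective: alternative
-- what changed: B replaces A's single capture-flag state machine with a boundary-first decomposition: find the start-marker index, then the stop-marker index in the tail, slice the block out, and key the not-found sentinel on the block being empty.
import Mathlib
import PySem

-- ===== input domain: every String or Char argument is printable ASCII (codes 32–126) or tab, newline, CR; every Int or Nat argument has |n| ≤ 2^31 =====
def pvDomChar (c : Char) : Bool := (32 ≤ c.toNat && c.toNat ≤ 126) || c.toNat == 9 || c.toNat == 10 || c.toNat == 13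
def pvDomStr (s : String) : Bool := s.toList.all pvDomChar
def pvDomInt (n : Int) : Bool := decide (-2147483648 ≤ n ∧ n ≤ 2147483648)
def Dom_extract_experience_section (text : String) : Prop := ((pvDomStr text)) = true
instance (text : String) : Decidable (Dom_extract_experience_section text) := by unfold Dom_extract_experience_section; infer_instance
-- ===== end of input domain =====

-- B finds the start and stop line indices first and slices the block out, instead of A's
-- capture-flag state machine; objective: simpler decomposition, same linear cost.

-- keyword lists and the marker test (the identical expression appears in both Pythons)
def pvExpKw : List String := ["experience", "work history", "internship", "employment"]
def pvStopKw : List String := ["education", "certifications", "projects", "skills", "languages", "contact"]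
def pvHits (kws : List String) (line : String) : Bool :=
  let t := PySem.Str.strip (PySem.Str.lower line)
  kws.any (fun k => PySem.Str.isIn k t) && PySem.Str.len t ≤ 60

-- ===== PORT A =====
-- the for-loop with its capture flag, break and accumulator, as structural recursion
def pvLoopA : List String → Bool → List String → List String
  | [], _, acc => acc
  | line :: rest, capture, acc =>
    if !capture && pvHits pvExpKw line then
      pvLoopA rest true acc
    else if capture then
      if pvHits pvStopKw line then acc     -- break
      else pvLoopA rest capture (acc ++ [PySem.Str.strip line])
    else
      pvLoopA rest capture acc

def extract_experience_section (text : String) : String :=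
  let lines := (PySem.Str.split? text "\n").getD []
  let experience_section := pvLoopA lines false []
  if experience_section = [] then "Experience section not found"
  else PySem.Str.strip (PySem.Str.join "\n" experience_section)

-- ===== PORT B =====
def extract_experience_section_alt (text : String) : String :=
  let lines := (PySem.Str.split? text "\n").getD []
  match lines.findIdx? (pvHits pvExpKw) with
  | none => "Experience section not found"
  | some i =>
    let rest := lines.drop (i + 1)
    let block := (match rest.findIdx? (pvHits pvStopKw) with
                  | none => rest
                  | some j => rest.take j).map PySem.Str.strip
    if block = [] then "Experience section not found"
    else PySem.Str.strip (PySem.Str.join "\n" block)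

-- ===== PRECONDITION & SPEC =====
def Spec_extract_experience_section (text : String) (out : String) : Prop := out = extract_experience_section_alt text
instance (text : String) (out : String) : Decidable (Spec_extract_experience_section text out) := by unfold Spec_extract_experience_section; infer_instance

-- ===== CLAIM (what is proved, stated in full; the proofs are below) =====
def Claim_equal_extract_experience_section : Prop := ∀ (text : String), Dom_extract_experience_section text → Spec_extract_experience_section text (extract_experience_section text)

-- ===== LEMMAS AND PROOFS =====

-- A's loop in capture mode collects stripped lines up to the first stop line (B's sliced block)
theorem pvLoopA_true (rest : List String) (acc : List String) :
    pvLoopA rest true acc =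
      acc ++ (match rest.findIdx? (pvHits pvStopKw) with
              | none => rest
              | some j => rest.take j).map PySem.Str.strip := by
  induction rest generalizing acc with
  | nil => simp [pvLoopA]
  | cons l t ih =>
    by_cases h : pvHits pvStopKw l
    · simp [pvLoopA, h, List.findIdx?_cons]
    · simp only [pvLoopA, h, Bool.not_true, Bool.false_and, ih, List.findIdx?_cons,
        if_false, Bool.false_eq_true, if_true]
      cases hf : t.findIdx? (pvHits pvStopKw) with
      | none => simp [List.append_assoc]
      | some j => simp [List.append_assoc]

-- A's loop before capture skips to the first start line (B's findIdx?) and then captures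
theorem pvLoopA_false (lines : List String) :
    pvLoopA lines false [] =
      match lines.findIdx? (pvHits pvExpKw) with
      | none => []
      | some i => pvLoopA (lines.drop (i + 1)) true [] := by
  induction lines with
  | nil => simp [pvLoopA]
  | cons l t ih =>
    by_cases h : pvHits pvExpKw l
    · simp [pvLoopA, h, List.findIdx?_cons]
    · simp only [pvLoopA, h, Bool.not_false, Bool.true_and, ih, List.findIdx?_cons,
        Bool.false_eq_true, if_false]
      cases hf : t.findIdx? (pvHits pvExpKw) with
      | none => simp
      | some i => simp

-- ===== VERDICT (by name: the statement is the Claim_ definition above) =====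
theorem extract_experience_section_spec : Claim_equal_extract_experience_section := by
  intro text _
  unfold Spec_extract_experience_section extract_experience_section extract_experience_section_alt
  simp only [pvLoopA_false]
  cases hf : ((PySem.Str.split? text "\n").getD []).findIdx? (pvHits pvExpKw) with
  | none => simp
  | some i => simp [pvLoopA_true]
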